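-- pv_equiv track=rewrite | github.com/localmonkey/rosalind | algorythmic_heights/ddeg/ddeg.py | bfs_modified
-- ===== SOURCE A (Python) =====
-- import queue
--
-- def bfs_modified(vrtx, adj_list, visited):
--     q = queue.Queue()
--     q.put(vrtx)
--
--     depth = 0
--     acc = 0
--     while(not q.empty()):
--         vrtxf = q.get()
--         visited[vrtxf] = True
--         if depth < 1:
--             for i in adj_list[vrtxf]:
--                 if (visited[i] == False):
--                     q.put(i)
--         if depth >= 1:
--             acc = acc + len(adj_list[vrtxf])
--         depth = depth + 1
--     return acc
-- ===== SOURCE B (Python) =====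
-- def bfs_modified(vrtx, adj_list, visited):
--     # no queue/depth machinery: mark the seed, collect its unvisited neighbors
--     # (duplicates kept), sum their degrees, then mark them
--     visited[vrtx] = True
--     cnt = [j for j in adj_list[vrtx] if not visited[j]]
--     acc = sum(len(adj_list[j]) for j in cnt)
--     for j in cnt:
--         visited[j] = True
--     return acc
-- ===== Notes on version B (the rewrite author's own statement) =====
-- stated objective: simpler
-- what changed: Replaced the FIFO queue and depth counter (a general BFS loop degenerated to depth 1) by a direct computation: mark the seed, filter its unvisited neighbors, sum their degrees.
import Mathlib
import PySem

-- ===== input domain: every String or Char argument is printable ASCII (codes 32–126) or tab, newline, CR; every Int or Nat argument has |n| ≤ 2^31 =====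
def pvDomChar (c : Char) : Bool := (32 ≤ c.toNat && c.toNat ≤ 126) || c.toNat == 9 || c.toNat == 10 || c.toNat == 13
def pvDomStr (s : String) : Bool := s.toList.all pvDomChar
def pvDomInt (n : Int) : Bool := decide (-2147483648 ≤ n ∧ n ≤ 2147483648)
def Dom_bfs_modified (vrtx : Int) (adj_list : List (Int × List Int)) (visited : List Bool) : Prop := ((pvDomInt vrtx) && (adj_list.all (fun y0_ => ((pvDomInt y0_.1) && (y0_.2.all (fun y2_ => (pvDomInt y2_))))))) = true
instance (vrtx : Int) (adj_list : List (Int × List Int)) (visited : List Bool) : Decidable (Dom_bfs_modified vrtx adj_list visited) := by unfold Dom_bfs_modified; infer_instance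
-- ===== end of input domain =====

-- B drops A's queue/depth machinery for a direct filter-and-sum (objective: simpler);
-- both Pythons mutate `visited` identically — the equivalence proved here is about the return value.

-- ===== PORT A =====
-- total size of all adjacency lists: bound used only for the termination measure of the loop
def pvDegSum (adj : List (Int × List Int)) : Nat :=
  adj.foldr (fun p a => p.2.length + a) 0

theorem pvLookup_length_le (adj : List (Int × List Int)) (v : Int) (nbrs : List Int)
    (h : List.lookup v adj = some nbrs) : nbrs.length ≤ pvDegSum adj := by
  induction adj with
  | nil => simp [List.lookup] at h
  | cons p rest ih =>
    rw [List.lookup] at h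
    by_cases hv : v == p.1
    · simp [hv] at h; simp [pvDegSum, ← h]
    · simp [hv] at h
      have := ih h
      simp [pvDegSum] at this ⊢
      omega

-- the while-loop of A: state = (queue, depth, acc, visited); where Python would raise
-- (IndexError on visited[…] / KeyError on adj_list[…]) the port stops — excluded by Pre_
def bfsLoop (adj : List (Int × List Int)) : List Int → Nat → Int → List Bool → Int
  | [], _, acc, _ => acc
  | v :: qs, depth, acc, vis =>
    match PySem.List.pySet? vis v true with
    | none => acc
    | some vis' =>
      match hl : List.lookup v adj with
      | none => acc
      | some nbrs =>
        let q' := if depth < 1 then qs ++ nbrs.filter (fun i => PySem.List.pyGet? vis' i == some false) else qs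
        let acc' := if depth ≥ 1 then acc + (nbrs.length : Int) else acc
        bfsLoop adj q' (depth + 1) acc' vis'
termination_by q depth _ _ => q.length + (if depth < 1 then pvDegSum adj + 1 else 0)
decreasing_by
  have hle := pvLookup_length_le adj v nbrs hl
  have hfle : (nbrs.filter (fun i => PySem.List.pyGet? vis' i == some false)).length ≤ nbrs.length :=
    List.length_filter_le _ _
  have hql : (qs ++ nbrs.filter (fun i => PySem.List.pyGet? vis' i == some false)).length
      = qs.length + (nbrs.filter (fun i => PySem.List.pyGet? vis' i == some false)).length := by
    simp
  simp only [List.length_cons]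
  split_ifs <;> omega

def bfs_modified (vrtx : Int) (adj_list : List (Int × List Int)) (visited : List Bool) : Int :=
  bfsLoop adj_list [vrtx] 0 0 visited

-- ===== PORT B =====
def bfs_modified_alt (vrtx : Int) (adj_list : List (Int × List Int)) (visited : List Bool) : Int :=
  match PySem.List.pySet? visited vrtx true with
  | none => 0
  | some vis1 =>
    match List.lookup vrtx adj_list with
    | none => 0
    | some nbrs =>
      let cnt := nbrs.filter (fun j => PySem.List.pyGet? vis1 j == some false)
      (cnt.map (fun j => (((List.lookup j adj_list).getD []).length : Int))).sum

-- ===== PRECONDITION & SPEC =====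
-- Pre_ excludes exactly the inputs where the Python raises: seed index out of range /
-- key missing, a neighbor index out of range, or an unvisited neighbor missing from adj_list.
def Pre_bfs_modified (vrtx : Int) (adj_list : List (Int × List Int)) (visited : List Bool) : Prop :=
  PySem.Raise.InRange visited.length vrtx ∧
  (List.lookup vrtx adj_list).isSome = true ∧
  ∀ j ∈ (List.lookup vrtx adj_list).getD [],
    PySem.Raise.InRange visited.length j ∧
    (PySem.List.pyGet? (PySem.List.pySetD visited vrtx true) j = some false →
      (List.lookup j adj_list).isSome = true)
instance (vrtx : Int) (adj_list : List (Int × List Int)) (visited : List Bool) : Decidable (Pre_bfs_modified vrtx adj_list visited) := by unfold Pre_bfs_modified; infer_instance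

def pvWitness_bfs_modified : Int × (List (Int × List Int)) × List Bool :=
  (0, [(0, [1]), (1, [0, 2])], [false, false])

def Spec_bfs_modified (vrtx : Int) (adj_list : List (Int × List Int)) (visited : List Bool) (out : Int) : Prop := out = bfs_modified_alt vrtx adj_list visited
instance (vrtx : Int) (adj_list : List (Int × List Int)) (visited : List Bool) (out : Int) : Decidable (Spec_bfs_modified vrtx adj_list visited out) := by unfold Spec_bfs_modified; infer_instance

-- ===== CLAIM (what is proved, stated in full; the proofs are below) =====
def Claim_equal_bfs_modified : Prop := ∀ (vrtx : Int) (adj_list : List (Int × List Int)) (visited : List Bool), Dom_bfs_modified vrtx adj_list visited → Pre_bfs_modified vrtx adj_list visited → Spec_bfs_modified vrtx adj_list visited (bfs_modified vrtx adj_list visited)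

-- ===== LEMMAS AND PROOFS =====
-- Once depth ≥ 1 the queue only drains: the loop just adds the degree of every queued vertex.
theorem bfsLoop_drain (adj : List (Int × List Int)) :
    ∀ (qs : List Int) (depth : Nat) (acc : Int) (vis : List Bool), 1 ≤ depth →
    (∀ j ∈ qs, PySem.Raise.InRange vis.length j ∧ (List.lookup j adj).isSome = true) →
    bfsLoop adj qs depth acc vis
      = acc + (qs.map (fun j => (((List.lookup j adj).getD []).length : Int))).sum := by
  intro qs
  induction qs with
  | nil => intro depth acc vis _ _; simp [bfsLoop]
  | cons v qs ih =>
    intro depth acc vis hd h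
    obtain ⟨hin, hsome⟩ := h v (by simp)
    obtain ⟨vis', hset⟩ : ∃ y, PySem.List.pySet? vis v true = some y := by
      rcases hs : PySem.List.pySet? vis v true with _ | y
      · rw [PySem.List.pySet?_eq_none_iff] at hs; exact absurd hin hs
      · exact ⟨y, rfl⟩
    obtain ⟨nbrs, hl⟩ := Option.isSome_iff_exists.mp hsome
    have hlen : vis'.length = vis.length := by
      have := PySem.List.length_pySetD vis v true
      simp [PySem.List.pySetD, hset] at this
      exact this
    rw [bfsLoop, hset, hl]
    have hnd : ¬ depth < 1 := by omega
    simp only [hnd, if_false, ge_iff_le, hd, if_true]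
    rw [ih (depth + 1) (acc + (nbrs.length : Int)) vis' (by omega)
        (fun j hj => by rw [hlen]; exact h j (by simp [hj]))]
    simp [hl]
    ring

theorem bfs_modified_spec : Claim_equal_bfs_modified := by
  intro vrtx adj vis _ hpre
  obtain ⟨hin, hsome, hall⟩ := hpre
  unfold Spec_bfs_modified bfs_modified bfs_modified_alt
  obtain ⟨vis1, hset⟩ : ∃ y, PySem.List.pySet? vis vrtx true = some y := by
    rcases hs : PySem.List.pySet? vis vrtx true with _ | y
    · rw [PySem.List.pySet?_eq_none_iff] at hs; exact absurd hin hs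
    · exact ⟨y, rfl⟩
  obtain ⟨nbrs, hl⟩ := Option.isSome_iff_exists.mp hsome
  have hvis1 : PySem.List.pySetD vis vrtx true = vis1 := by
    simp [PySem.List.pySetD, hset]
  have hlen : vis1.length = vis.length := by
    have := PySem.List.length_pySetD vis vrtx true
    rw [hvis1] at this; exact this
  rw [bfsLoop, hset, hl]
  simp only [show (0:Nat) < 1 by omega, if_true, show ¬ (0:Nat) ≥ 1 by omega, if_false,
    List.nil_append]
  rw [bfsLoop_drain adj _ 1 0 vis1 (by omega) ?h]
  · simp
  case h =>
    intro j hj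
    rw [List.mem_filter] at hj
    obtain ⟨hjn, hjf⟩ := hj
    have := hall j (by simp [hl]; exact hjn)
    rw [hvis1] at this
    refine ⟨by rw [hlen]; exact this.1, this.2 (by simpa using hjf)⟩

-- ===== VERDICT (by name: the statement is the Claim_ definition above) =====
-- (theorem above serves as the verdict)
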